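-- pv_equiv track=rewrite | github.com/DamianPala/haz-skills | change-summary/scripts/src/change_summary/chunk.py | chunk_by_file
-- ===== SOURCE A (Python) =====
-- def estimate_tokens(text: str) -> int:
--     """Rough estimate: ~4 chars per token for code."""
--     return len(text) // 4
--
-- def chunk_by_file(
--     header: str,
--     commit_log_sidebar: str,
--     file_sections: list[str],
--     skipped_section: str,
--     max_tokens: int,
-- ) -> list[str]:
--     """Split file-based output into token-budget chunks.
--
--     Each chunk gets header + commit log sidebar. File sections fill
--     greedily until budget. Skipped section appended to the last chunk.
--     """
--     overhead = header + commit_log_sidebar + "---\n\n"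
--     overhead_tokens = estimate_tokens(overhead)
--     budget = max_tokens - overhead_tokens - 100
--
--     if budget <= 0:
--         all_text = overhead
--         for fs in file_sections:
--             all_text += fs + "\n---\n\n"
--         all_text += skipped_section
--         return [all_text]
--
--     chunks: list[str] = []
--     current_parts: list[str] = []
--     current_tokens = 0
--
--     for fs in file_sections:
--         fs_tokens = estimate_tokens(fs)
--
--         if current_parts and (current_tokens + fs_tokens) > budget:
--             chunk_text = overhead + "\n---\n\n".join(current_parts) + "\n"
--             chunks.append(chunk_text)
--             current_parts = []
--             current_tokens = 0
--
--         current_parts.append(fs)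
--         current_tokens += fs_tokens
--
--     if current_parts:
--         chunk_text = overhead + "\n---\n\n".join(current_parts) + "\n"
--         if skipped_section:
--             chunk_text += "\n" + skipped_section
--         chunks.append(chunk_text)
--     elif skipped_section:
--         chunks.append(overhead + skipped_section)
--
--     if not chunks:
--         chunks.append(overhead.rstrip())
--
--     return chunks
-- ===== SOURCE B (Python) =====
-- def chunk_by_file(header, commit_log_sidebar, file_sections, skipped_section, max_tokens):
--     """Partition sections into greedy groups first, then render each group."""
--     overhead = header + commit_log_sidebar + "---\n\n"
--     budget = max_tokens - len(overhead) // 4 - 100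
--
--     if budget <= 0:
--         return [overhead + "".join(fs + "\n---\n\n" for fs in file_sections) + skipped_section]
--
--     groups = _greedy_groups(file_sections, budget)
--     chunks = [overhead + "\n---\n\n".join(g) + "\n" for g in groups]
--
--     if chunks:
--         if skipped_section:
--             chunks[-1] += "\n" + skipped_section
--     elif skipped_section:
--         chunks = [overhead + skipped_section]
--     else:
--         chunks = [overhead.rstrip()]
--     return chunks
--
--
-- def _greedy_groups(sections, budget):
--     """Greedy prefix: first section unconditionally, then while the total fits."""
--     if not sections:
--         return []
--     group = [sections[0]]
--     tokens = len(sections[0]) // 4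
--     i = 1
--     while i < len(sections) and tokens + len(sections[i]) // 4 <= budget:
--         group.append(sections[i])
--         tokens += len(sections[i]) // 4
--         i += 1
--     return [group] + _greedy_groups(sections[i:], budget)
-- ===== Notes on version B (the rewrite author's own statement) =====
-- stated objective: alternative
-- what changed: B replaces A's single stateful accumulate-and-flush loop by a two-phase decomposition: a recursive greedy partition of the sections into groups (prefix-taking while the token total fits), then a second pass that renders every group and appends the skipped section to the last rendered chunk.
import Mathlib
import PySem

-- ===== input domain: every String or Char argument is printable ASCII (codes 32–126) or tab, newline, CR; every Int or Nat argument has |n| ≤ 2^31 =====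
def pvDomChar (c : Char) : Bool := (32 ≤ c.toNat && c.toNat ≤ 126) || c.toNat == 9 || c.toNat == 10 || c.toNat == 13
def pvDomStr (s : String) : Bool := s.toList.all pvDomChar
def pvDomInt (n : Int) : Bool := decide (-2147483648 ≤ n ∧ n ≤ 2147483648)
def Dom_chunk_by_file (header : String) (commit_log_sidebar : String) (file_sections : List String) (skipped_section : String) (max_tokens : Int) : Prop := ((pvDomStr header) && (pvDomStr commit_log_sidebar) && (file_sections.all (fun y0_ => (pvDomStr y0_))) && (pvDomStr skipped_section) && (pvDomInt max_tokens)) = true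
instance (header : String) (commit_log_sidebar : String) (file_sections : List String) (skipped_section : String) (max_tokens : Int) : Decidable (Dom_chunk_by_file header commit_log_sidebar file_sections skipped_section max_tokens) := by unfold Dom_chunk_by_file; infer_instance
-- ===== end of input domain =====

-- B partitions the sections into greedy groups by recursive prefix-taking and renders
-- each group in a second pass (objective: alternative decomposition, same cost).

-- ===== PORT A =====
def estimate_tokens (text : String) : Int := PySem.Int.floordiv (PySem.Str.len text) 4

-- one iteration of A's greedy loop over (chunks, current_parts, current_tokens)
def pvStepA (overhead : String) (budget : Int)
    (s : List String × List String × Int) (fs : String) : List String × List String × Int :=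
  let fs_tokens := estimate_tokens fs
  if s.2.1 ≠ [] ∧ s.2.2 + fs_tokens > budget then
    (s.1 ++ [overhead ++ PySem.Str.join "\n---\n\n" s.2.1 ++ "\n"], [fs], fs_tokens)
  else
    (s.1, s.2.1 ++ [fs], s.2.2 + fs_tokens)

def chunk_by_file (header : String) (commit_log_sidebar : String) (file_sections : List String) (skipped_section : String) (max_tokens : Int) : List String :=
  let overhead := header ++ commit_log_sidebar ++ "---\n\n"
  let overhead_tokens := estimate_tokens overhead
  let budget := max_tokens - overhead_tokens - 100
  if budget ≤ 0 then
    let all_text := file_sections.foldl (fun acc fs => acc ++ fs ++ "\n---\n\n") overhead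
    [all_text ++ skipped_section]
  else
    let st := file_sections.foldl (pvStepA overhead budget) ([], [], 0)
    let chunks := st.1
    let current_parts := st.2.1
    let chunks :=
      if current_parts ≠ [] then
        let chunk_text := overhead ++ PySem.Str.join "\n---\n\n" current_parts ++ "\n"
        let chunk_text := if skipped_section ≠ "" then chunk_text ++ "\n" ++ skipped_section else chunk_text
        chunks ++ [chunk_text]
      else if skipped_section ≠ "" then chunks ++ [overhead ++ skipped_section]
      else chunks
    if chunks = [] then [PySem.Str.rstrip overhead] else chunks

-- ===== PORT B =====
-- the `while` of _greedy_groups: keep taking sections while the running total fits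
def pvTakeGroup (budget : Int) (tokens : Int) : List String → List String × List String
  | [] => ([], [])
  | fs :: rest =>
    let t := PySem.Int.floordiv (PySem.Str.len fs) 4
    if tokens + t ≤ budget then
      let p := pvTakeGroup budget (tokens + t) rest
      (fs :: p.1, p.2)
    else ([], fs :: rest)

-- termination measure for pvGreedyGroups (cited by its decreasing_by)
theorem pvTakeGroup_len (budget tokens : Int) (xs : List String) :
    (pvTakeGroup budget tokens xs).2.length ≤ xs.length := by
  induction xs generalizing tokens with
  | nil => simp [pvTakeGroup]
  | cons fs rest ih =>
    simp only [pvTakeGroup]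
    split
    · exact le_trans (ih _) (by simp)
    · simp

def pvGreedyGroups (budget : Int) : List String → List (List String)
  | [] => []
  | fs :: rest =>
    let p := pvTakeGroup budget (PySem.Int.floordiv (PySem.Str.len fs) 4) rest
    (fs :: p.1) :: pvGreedyGroups budget p.2
termination_by xs => xs.length
decreasing_by
  have := pvTakeGroup_len budget (PySem.Int.floordiv (PySem.Str.len fs) 4) rest
  simp only [List.length_cons]; omega

-- chunks[-1] += suffix
def pvAppendLast (suffix : String) : List String → List String
  | [] => []
  | [c] => [c ++ suffix]
  | c :: c' :: rest => c :: pvAppendLast suffix (c' :: rest)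

def chunk_by_file_alt (header : String) (commit_log_sidebar : String) (file_sections : List String) (skipped_section : String) (max_tokens : Int) : List String :=
  let overhead := header ++ commit_log_sidebar ++ "---\n\n"
  let budget := max_tokens - PySem.Int.floordiv (PySem.Str.len overhead) 4 - 100
  if budget ≤ 0 then
    [overhead ++ PySem.Str.join "" (file_sections.map (fun fs => fs ++ "\n---\n\n")) ++ skipped_section]
  else
    let groups := pvGreedyGroups budget file_sections
    let chunks := groups.map (fun g => overhead ++ PySem.Str.join "\n---\n\n" g ++ "\n")
    if chunks ≠ [] then
      if skipped_section ≠ "" then pvAppendLast ("\n" ++ skipped_section) chunks else chunks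
    else if skipped_section ≠ "" then [overhead ++ skipped_section]
    else [PySem.Str.rstrip overhead]

-- ===== PRECONDITION & SPEC =====
def Spec_chunk_by_file (header : String) (commit_log_sidebar : String) (file_sections : List String) (skipped_section : String) (max_tokens : Int) (out : List String) : Prop := out = chunk_by_file_alt header commit_log_sidebar file_sections skipped_section max_tokens
instance (header : String) (commit_log_sidebar : String) (file_sections : List String) (skipped_section : String) (max_tokens : Int) (out : List String) : Decidable (Spec_chunk_by_file header commit_log_sidebar file_sections skipped_section max_tokens out) := by unfold Spec_chunk_by_file; infer_instance

-- ===== CLAIM (what is proved, stated in full; the proofs are below) =====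
def Claim_equal_chunk_by_file : Prop := ∀ (header : String) (commit_log_sidebar : String) (file_sections : List String) (skipped_section : String) (max_tokens : Int), Dom_chunk_by_file header commit_log_sidebar file_sections skipped_section max_tokens → Spec_chunk_by_file header commit_log_sidebar file_sections skipped_section max_tokens (chunk_by_file header commit_log_sidebar file_sections skipped_section max_tokens)

-- ===== LEMMAS AND PROOFS =====

theorem pvJoin0_cons (a : String) (l : List String) :
    PySem.Str.join "" (a :: l) = a ++ PySem.Str.join "" l := by
  cases l with
  | nil => simp [PySem.Str.join, PySem.Chars.join_singleton, PySem.Chars.join_nil]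
  | cons b r =>
    simp [PySem.Str.join, PySem.Chars.join_cons_cons]

-- A's budget ≤ 0 accumulation equals overhead ++ "".join(map (· ++ sep))
theorem pvFold_join (xs : List String) : ∀ (acc : String),
    xs.foldl (fun acc fs => acc ++ fs ++ "\n---\n\n") acc
      = acc ++ PySem.Str.join "" (xs.map (fun fs => fs ++ "\n---\n\n")) := by
  induction xs with
  | nil => intro acc; simp [PySem.Str.join, PySem.Chars.join_nil]
  | cons x r ih =>
    intro acc
    simp only [List.foldl_cons, List.map_cons, pvJoin0_cons, ih]
    simp [String.append_assoc]

def pvRender (overhead : String) (g : List String) : String :=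
  overhead ++ PySem.Str.join "\n---\n\n" g ++ "\n"

-- the group structure of A's loop: fronts (already flushed groups) and the pending last group
def pvSplitG (budget : Int) (tokens : Int) (parts : List String) :
    List String → List (List String) × List String
  | [] => ([], parts)
  | fs :: rest =>
    let t := PySem.Int.floordiv (PySem.Str.len fs) 4
    if tokens + t ≤ budget then pvSplitG budget (tokens + t) (parts ++ [fs]) rest
    else
      let p := pvSplitG budget t [fs] rest
      (parts :: p.1, p.2)

theorem pvSplitG_last_ne (budget : Int) (secs : List String) :
    ∀ (tokens : Int) (parts : List String), parts ≠ [] →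
      (pvSplitG budget tokens parts secs).2 ≠ [] := by
  induction secs with
  | nil => intro tokens parts hp; simpa [pvSplitG] using hp
  | cons fs rest ih =>
    intro tokens parts hp
    simp only [pvSplitG]
    split
    · exact ih _ _ (by simp)
    · exact ih _ _ (by simp)

-- pvSplitG agrees with B's pvTakeGroup/pvGreedyGroups decomposition
theorem pvSplitG_groups (budget : Int) (secs : List String) :
    ∀ (tokens : Int) (parts : List String),
      (pvSplitG budget tokens parts secs).1 ++ [(pvSplitG budget tokens parts secs).2]
        = (parts ++ (pvTakeGroup budget tokens secs).1)
            :: pvGreedyGroups budget (pvTakeGroup budget tokens secs).2 := by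
  induction secs with
  | nil => intro tokens parts; simp [pvSplitG, pvTakeGroup, pvGreedyGroups]
  | cons fs rest ih =>
    intro tokens parts
    simp only [pvSplitG, pvTakeGroup]
    split
    · rw [ih]
      simp
    · simp only [List.cons_append]
      rw [ih]
      simp [pvGreedyGroups]

-- A's loop in terms of pvSplitG
theorem pvLoop (overhead : String) (budget : Int) (secs : List String) :
    ∀ (tokens : Int) (parts chunks : List String), parts ≠ [] →
      ∃ tk, secs.foldl (pvStepA overhead budget) (chunks, parts, tokens)
        = (chunks ++ (pvSplitG budget tokens parts secs).1.map (pvRender overhead),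
           (pvSplitG budget tokens parts secs).2, tk) := by
  induction secs with
  | nil =>
    intro tokens parts chunks hp
    exact ⟨tokens, by simp [pvSplitG]⟩
  | cons fs rest ih =>
    intro tokens parts chunks hp
    rw [List.foldl_cons]
    by_cases h : tokens + PySem.Int.floordiv (PySem.Str.len fs) 4 ≤ budget
    · have hstep : pvStepA overhead budget (chunks, parts, tokens) fs
          = (chunks, parts ++ [fs], tokens + estimate_tokens fs) := by
        unfold pvStepA
        rw [if_neg]
        rintro ⟨-, hgt⟩
        simp only [estimate_tokens] at hgt
        omega
      obtain ⟨tk, htk⟩ := ih (tokens + estimate_tokens fs) (parts ++ [fs]) chunks (by simp)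
      refine ⟨tk, ?_⟩
      rw [hstep, htk]
      simp only [pvSplitG, estimate_tokens]
      rw [if_pos h]
    · have hstep : pvStepA overhead budget (chunks, parts, tokens) fs
          = (chunks ++ [pvRender overhead parts], [fs], estimate_tokens fs) := by
        unfold pvStepA
        rw [if_pos]
        · rfl
        · exact ⟨hp, by simp only [estimate_tokens]; omega⟩
      obtain ⟨tk, htk⟩ := ih (estimate_tokens fs) [fs] (chunks ++ [pvRender overhead parts]) (by simp)
      refine ⟨tk, ?_⟩
      rw [hstep, htk]
      simp only [pvSplitG, estimate_tokens]
      rw [if_neg h]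
      simp

theorem pvAppendLast_snoc (s : String) (xs : List String) :
    ∀ (x : String), pvAppendLast s (xs ++ [x]) = xs ++ [x ++ s] := by
  induction xs with
  | nil => intro x; simp [pvAppendLast]
  | cons c cs ih =>
    intro x
    cases cs with
    | nil => simp [pvAppendLast]
    | cons c' cs' =>
      simp only [List.cons_append, pvAppendLast]
      exact congrArg (List.cons c) (ih x)

-- ===== VERDICT (by name: the statement is the Claim_ definition above) =====
theorem chunk_by_file_spec : Claim_equal_chunk_by_file := by
  intro header commit_log_sidebar file_sections skipped_section max_tokens _
  unfold Spec_chunk_by_file chunk_by_file chunk_by_file_alt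
  simp only [estimate_tokens]
  by_cases hb : max_tokens - PySem.Int.floordiv (PySem.Str.len (header ++ commit_log_sidebar ++ "---\n\n")) 4 - 100 ≤ 0
  · rw [if_pos hb, if_pos hb]
    rw [pvFold_join]
  · rw [if_neg hb, if_neg hb]
    set overhead := header ++ commit_log_sidebar ++ "---\n\n" with hov
    set budget := max_tokens - PySem.Int.floordiv (PySem.Str.len overhead) 4 - 100 with hbd
    cases file_sections with
    | nil =>
      by_cases hsk : skipped_section = "" <;> simp [pvGreedyGroups, hsk]
    | cons fs rest =>
      have hstep0 : pvStepA overhead budget ([], [], 0) fs = ([], [fs], estimate_tokens fs) := by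
        unfold pvStepA
        rw [if_neg]
        · simp
        · rintro ⟨hne, -⟩; exact hne rfl
      obtain ⟨tk, htk⟩ := pvLoop overhead budget rest (estimate_tokens fs) [fs] [] (by simp)
      rw [List.foldl_cons, hstep0, htk]
      have hgroups : pvGreedyGroups budget (fs :: rest)
          = (pvSplitG budget (estimate_tokens fs) [fs] rest).1
              ++ [(pvSplitG budget (estimate_tokens fs) [fs] rest).2] := by
        rw [pvSplitG_groups]
        simp [pvGreedyGroups, estimate_tokens]
      set front := (pvSplitG budget (estimate_tokens fs) [fs] rest).1 with hfr
      set lastg := (pvSplitG budget (estimate_tokens fs) [fs] rest).2 with hlg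
      have hlast : lastg ≠ [] := pvSplitG_last_ne budget rest (estimate_tokens fs) [fs] (by simp)
      rw [hgroups]
      by_cases hsk : skipped_section = ""
      · simp [hsk, hlast, pvRender, String.append_assoc]
      · simp [hsk, hlast, pvRender, pvAppendLast_snoc, String.append_assoc]
        rw [show ("\n\n" : String) = "\n" ++ "\n" from rfl, String.append_assoc]
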